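-- pv_equiv track=rewrite | github.com/Yadkee/dailyprogrammer | problems/[2018-03-16] Challenge #354 [Hard] Integer Complexity 3.py | sixn
-- ===== SOURCE A (Python) =====
-- from itertools import count
--
-- def sixn(m):
--     """Yields values in the form of 6n - 1 and 6n + 1 until m"""
--     if m <= 2:
--         return ()
--     if m > 2:
--         yield 2
--     if m > 3:
--         yield 3
--     for n in count(1):
--         x = 6 * n - 1
--         y = x + 2
--         if x < m:
--             yield x
--         else:
--             break
--         if y < m:
--             yield y
--         else:
--             break
-- ===== SOURCE B (Python) =====
-- def sixn(m):
--     """Yields values in the form of 6n - 1 and 6n + 1 until m"""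
--     for c in range(2, m):
--         if c == 2 or c == 3 or c % 6 == 1 or c % 6 == 5:
--             yield c
-- ===== Notes on version B (the rewrite author's own statement) =====
-- stated objective: simpler
-- what changed: B replaces A's stepping loop over n with explicit 6n-1/6n+1 arithmetic and break checks by a single scan of range(2, m) filtered by the modular predicate c in {2,3} or c % 6 in {1,5}.
import Mathlib
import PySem

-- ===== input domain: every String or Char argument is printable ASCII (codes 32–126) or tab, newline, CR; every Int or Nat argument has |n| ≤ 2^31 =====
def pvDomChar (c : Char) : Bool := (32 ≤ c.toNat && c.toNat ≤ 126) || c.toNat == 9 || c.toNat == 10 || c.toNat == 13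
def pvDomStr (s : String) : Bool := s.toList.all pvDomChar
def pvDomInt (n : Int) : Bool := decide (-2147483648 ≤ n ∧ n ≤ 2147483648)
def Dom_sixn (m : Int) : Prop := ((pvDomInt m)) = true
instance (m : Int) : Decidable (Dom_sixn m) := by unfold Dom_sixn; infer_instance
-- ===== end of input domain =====

-- B replaces A's 6n±1 stepping loop with a filtered scan of range(2, m); objective: simpler.


-- ===== PORT A =====
-- the 'for n in count(1)' loop: x = 6n-1, y = x+2; yield/break exactly as in A
def sixnLoop (m : Int) (n : Int) : List Int :=
  let x := 6 * n - 1
  let y := x + 2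
  if _hx : x < m then
    if y < m then x :: y :: sixnLoop m (n + 1)
    else [x]
  else []
termination_by (m - (6 * n - 1)).toNat
decreasing_by omega

def sixn (m : Int) : List Int :=
  if m ≤ 2 then []
  else (if 2 < m then [2] else []) ++ (if 3 < m then [3] else []) ++ sixnLoop m 1

-- ===== PORT B =====
def sixnKeep (c : Int) : Bool :=
  c == 2 || c == 3 || PySem.Int.mod c 6 == 1 || PySem.Int.mod c 6 == 5

def sixn_alt (m : Int) : List Int :=
  (PySem.List.pyRange 2 m 1).filter sixnKeep

-- ===== PRECONDITION & SPEC =====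
def Spec_sixn (m : Int) (out : List Int) : Prop := out = sixn_alt m
instance (m : Int) (out : List Int) : Decidable (Spec_sixn m out) := by unfold Spec_sixn; infer_instance

-- ===== CLAIM (what is proved, stated in full; the proofs are below) =====
def Claim_equal_sixn : Prop := ∀ (m : Int), Dom_sixn m → Spec_sixn m (sixn m)

-- ===== LEMMAS AND PROOFS =====

theorem sixnKeep_true {c : Int} (h : c % 6 = 1 ∨ c % 6 = 5 ∨ c = 2 ∨ c = 3) :
    sixnKeep c = true := by
  simp [sixnKeep]
  omega

theorem sixnKeep_false {c : Int} (h : c % 6 ≠ 1 ∧ c % 6 ≠ 5 ∧ c ≠ 2 ∧ c ≠ 3) :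
    sixnKeep c = false := by
  simp [sixnKeep]
  omega

-- peel one kept element c off a filtered range
theorem filter_keep {m c : Int} (hlt : c < m) (h : c % 6 = 1 ∨ c % 6 = 5 ∨ c = 2 ∨ c = 3) :
    (PySem.List.pyRange c m 1).filter sixnKeep
      = c :: (PySem.List.pyRange (c + 1) m 1).filter sixnKeep := by
  rw [PySem.List.pyRange_one_cons hlt, List.filter_cons, sixnKeep_true h]
  simp

-- peel one dropped element c off a filtered range
theorem filter_drop {m c : Int} (hlt : c < m)
    (h : c % 6 ≠ 1 ∧ c % 6 ≠ 5 ∧ c ≠ 2 ∧ c ≠ 3) :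
    (PySem.List.pyRange c m 1).filter sixnKeep
      = (PySem.List.pyRange (c + 1) m 1).filter sixnKeep := by
  rw [PySem.List.pyRange_one_cons hlt, List.filter_cons, sixnKeep_false h]
  simp

theorem filter_nil {m c : Int} (h : m ≤ c) :
    (PySem.List.pyRange c m 1).filter sixnKeep = [] := by
  rw [PySem.List.pyRange_one_eq_nil (by omega)]
  rfl

-- drop c if it is below m, nothing left otherwise (for the skipped residues 6n+2..6n+4)
theorem filter_skip {m c : Int} (hc : 4 ≤ c)
    (h : c % 6 ≠ 1 ∧ c % 6 ≠ 5)
    (hnext : (PySem.List.pyRange (c + 1) m 1).filter sixnKeep = []) :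
    (PySem.List.pyRange c m 1).filter sixnKeep = [] := by
  by_cases hlt : c < m
  · rw [filter_drop hlt (by omega), hnext]
  · exact filter_nil (by omega)

-- the loop equals B's filtered scan starting at 6n-1
theorem loop_eq (m n : Int) (hn : 1 ≤ n) :
    sixnLoop m n = (PySem.List.pyRange (6 * n - 1) m 1).filter sixnKeep := by
  rw [sixnLoop]
  by_cases hx : 6 * n - 1 < m
  · by_cases hy : 6 * n - 1 + 2 < m
    · simp only [dif_pos hx, if_pos hy]
      rw [filter_keep hx (by omega)]
      have e1 : (6 * n - 1 + 1 : Int) = 6 * n := by ring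
      rw [e1, filter_drop (by omega) (by omega)]
      have e2 : (6 * n + 1 : Int) = 6 * n - 1 + 2 := by ring
      rw [e2, filter_keep hy (by omega)]
      congr 1
      congr 1
      rw [loop_eq m (n + 1) (by omega)]
      rw [(by ring : (6 * n - 1 + 2 + 1 : Int) = 6 * n + 2),
        (by ring : (6 * (n + 1) - 1 : Int) = 6 * n + 5)]
      by_cases hA : 6 * n + 2 < m
      · rw [filter_drop hA (by omega), (by ring : (6 * n + 2 + 1 : Int) = 6 * n + 3)]
        by_cases hB : 6 * n + 3 < m
        · rw [filter_drop hB (by omega), (by ring : (6 * n + 3 + 1 : Int) = 6 * n + 4)]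
          by_cases hC : 6 * n + 4 < m
          · rw [filter_drop hC (by omega), (by ring : (6 * n + 4 + 1 : Int) = 6 * n + 5)]
          · rw [filter_nil (by omega), filter_nil (by omega)]
        · rw [filter_nil (by omega), filter_nil (by omega)]
      · rw [filter_nil (by omega), filter_nil (by omega)]
    · simp only [dif_pos hx, if_neg hy]
      rw [filter_keep hx (by omega)]
      congr 1
      exact (filter_skip (by omega) (by omega) (filter_nil (by omega))).symm
  · simp only [dif_neg hx]
    exact (filter_nil (by omega)).symm
termination_by (m - (6 * n - 1)).toNat
decreasing_by omega

-- ===== VERDICT (by name: the statement is the Claim_ definition above) =====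
theorem sixn_spec : Claim_equal_sixn := by
  intro m _
  unfold Spec_sixn sixn sixn_alt
  by_cases h2 : m ≤ 2
  · rw [if_pos h2]
    exact (filter_nil (by omega)).symm
  · rw [if_neg h2, if_pos (by omega : (2:Int) < m)]
    rw [filter_keep (by omega : (2:Int) < m) (by omega)]
    by_cases h3 : 3 < m
    · rw [if_pos h3, (by norm_num : (2:Int) + 1 = 3), filter_keep h3 (by omega)]
      rw [loop_eq m 1 (by omega), (by norm_num : (3:Int) + 1 = 6 * 1 - 1 - 1)]
      by_cases h4 : 6 * 1 - 1 - 1 < m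
      · rw [filter_drop h4 (by omega)]
        norm_num
      · rw [filter_nil (by omega), filter_nil (by omega)]
        rfl
    · rw [if_neg h3]
      simp only [List.cons_append, List.nil_append, List.append_nil]
      congr 1
      rw [loop_eq m 1 (by omega)]
      rw [filter_nil (by omega), filter_nil (by omega)]
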